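-- pv_equiv track=rewrite | github.com/si6Och4j/mpu-crypto | share.py | concat_blocks
-- ===== SOURCE A (Python) =====
-- def concat_blocks(data, size=32, total_size=-1):
--     cnt = 0
--     result = 0
--     mask = (1 << size) - 1
--     for i in data:
--         i = int(i)
--         if total_size > 0 and total_size < size:
--             result |= (i & (1 << total_size) - 1) << size * cnt
--             break
--         else:
--             result |= (i & mask) << size * cnt
--
--         total_size -= size
--         cnt += 1
--
--     return result
-- ===== SOURCE B (Python) =====
-- def concat_blocks(data, size=32, total_size=-1):
--     # Decide the block list up front, then assemble back-to-front (Horner style).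
--     mask = (1 << size) - 1
--     if size > 0 and total_size > 0 and total_size % size != 0:
--         # truncation happens exactly at block k = total_size // size (if it exists)
--         k = total_size // size
--         blocks = [int(x) & mask for x in data[:k]]
--         if k < len(data):
--             blocks.append(int(data[k]) & ((1 << (total_size % size)) - 1))
--     else:
--         blocks = [int(x) & mask for x in data]
--     result = 0
--     for b in reversed(blocks):
--         result = (result << size) | b
--     return result
-- ===== Notes on version B (the rewrite author's own statement) =====
-- stated objective: alternative
-- what changed: B first materialises the list of masked blocks (computing the truncation index total_size//size arithmetically instead of decrementing total_size through the loop), then assembles the result back-to-front with a Horner-style (result << size) | b fold, instead of A's forward loop OR-ing each block shifted by size*cnt.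
import Mathlib
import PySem

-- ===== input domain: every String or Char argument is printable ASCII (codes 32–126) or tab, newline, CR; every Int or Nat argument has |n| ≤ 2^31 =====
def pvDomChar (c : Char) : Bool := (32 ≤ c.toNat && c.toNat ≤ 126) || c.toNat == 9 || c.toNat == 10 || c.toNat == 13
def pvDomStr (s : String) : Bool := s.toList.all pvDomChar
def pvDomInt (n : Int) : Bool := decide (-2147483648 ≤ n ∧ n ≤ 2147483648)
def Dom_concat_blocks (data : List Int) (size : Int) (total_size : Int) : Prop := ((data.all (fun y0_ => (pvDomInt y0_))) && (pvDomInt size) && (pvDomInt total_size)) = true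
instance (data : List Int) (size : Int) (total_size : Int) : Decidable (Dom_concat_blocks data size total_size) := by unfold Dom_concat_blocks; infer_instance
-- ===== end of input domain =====

-- B replaces A's forward loop (shift each masked block by size*cnt and OR it in,
-- decrementing total_size) by: build the masked block list up front, computing the
-- truncation point total_size // size arithmetically, then assemble back-to-front
-- with a Horner-style (result << size) | b fold. Same cost class; proved equal on size ≥ 0.

-- ===== PORT A =====
-- the for-loop of A with its mutable state (cnt, result, total_size); 'break' = return.
-- Shift amounts use .toNat: under Pre_ (0 ≤ size) every shift amount size*cnt and the
-- mask exponents are nonnegative, exactly where Python's << is defined.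
def pvLoopA (size mask : Int) : List Int → Int → Int → Int → Int
  | [], _, result, _ => result
  | i :: rest, cnt, result, ts =>
    if 0 < ts ∧ ts < size then
      PySem.Int.bor result ((PySem.Int.band i ((1 <<< ts.toNat) - 1)) <<< (size * cnt).toNat)
    else
      pvLoopA size mask rest (cnt + 1)
        (PySem.Int.bor result ((PySem.Int.band i mask) <<< (size * cnt).toNat)) (ts - size)

def concat_blocks (data : List Int) (size : Int) (total_size : Int) : Int :=
  pvLoopA size ((1 <<< size.toNat) - 1) data 0 0 total_size

-- ===== PORT B =====
-- Source B's 'blocks' list.  data[k] is ported as pyGetD data k 0: the branch guarantees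
-- 0 ≤ k < len data, so the default is never used.
def pvBlocksB (data : List Int) (size : Int) (total_size : Int) : List Int :=
  if 0 < size ∧ 0 < total_size ∧ PySem.Int.mod total_size size ≠ 0 then
    if PySem.Int.floordiv total_size size < (data.length : Int) then
      (PySem.List.slice data none (some (PySem.Int.floordiv total_size size))).map
          (fun x => PySem.Int.band x ((1 <<< size.toNat) - 1))
        ++ [PySem.Int.band (PySem.List.pyGetD data (PySem.Int.floordiv total_size size) 0)
              ((1 <<< (PySem.Int.mod total_size size).toNat) - 1)]
    else
      (PySem.List.slice data none (some (PySem.Int.floordiv total_size size))).map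
        (fun x => PySem.Int.band x ((1 <<< size.toNat) - 1))
  else
    data.map (fun x => PySem.Int.band x ((1 <<< size.toNat) - 1))

def concat_blocks_alt (data : List Int) (size : Int) (total_size : Int) : Int :=
  (pvBlocksB data size total_size).reverse.foldl
    (fun r b => PySem.Int.bor (r <<< size.toNat) b) 0

-- ===== PRECONDITION & SPEC =====
-- Python A raises ValueError ('negative shift count') at 'mask = (1 << size) - 1'
-- whenever size < 0, on every data; Pre_ excludes exactly that.
def Pre_concat_blocks (data : List Int) (size : Int) (total_size : Int) : Prop := 0 ≤ size
instance (data : List Int) (size : Int) (total_size : Int) : Decidable (Pre_concat_blocks data size total_size) := by unfold Pre_concat_blocks; infer_instance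

def pvWitness_concat_blocks : List Int × Int × Int := ([1, 2, 3], 4, 10)

def Spec_concat_blocks (data : List Int) (size : Int) (total_size : Int) (out : Int) : Prop := out = concat_blocks_alt data size total_size
instance (data : List Int) (size : Int) (total_size : Int) (out : Int) : Decidable (Spec_concat_blocks data size total_size out) := by unfold Spec_concat_blocks; infer_instance

-- ===== CLAIM (what is proved, stated in full; the proofs are below) =====
def Claim_equal_concat_blocks : Prop := ∀ (data : List Int) (size : Int) (total_size : Int), Dom_concat_blocks data size total_size → Pre_concat_blocks data size total_size → Spec_concat_blocks data size total_size (concat_blocks data size total_size)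

-- ===== LEMMAS AND PROOFS =====

-- Python // and % with a nonnegative divisor ---------------------------------

theorem pv_floordiv_eq (a b : Int) (hb : 0 ≤ b) : PySem.Int.floordiv a b = a / b := by
  unfold PySem.Int.floordiv; rw [Int.fdiv_eq_ediv]; simp [hb]

theorem pv_mod_eq (a b : Int) (hb : 0 ≤ b) : PySem.Int.mod a b = a % b := by
  unfold PySem.Int.mod; rw [Int.fmod_eq_emod]; simp [hb]

-- nonneg-world bit algebra ---------------------------------------------------

theorem pv_mask_nonneg (n : Nat) : (0 : Int) ≤ (1 <<< n) - 1 := by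
  have h : 1 ≤ (1 <<< n : Nat) := by rw [Nat.shiftLeft_eq]; simpa using Nat.one_le_two_pow
  omega

theorem pv_bor_nonneg {a b : Int} (ha : 0 ≤ a) (hb : 0 ≤ b) :
    0 ≤ PySem.Int.bor a b := by
  rw [PySem.Int.bor_of_nonneg ha hb]; exact Int.natCast_nonneg _

theorem pv_band_mask_nonneg (x m : Int) (hm : 0 ≤ m) : 0 ≤ PySem.Int.band x m := by
  rw [PySem.Int.band_comm]; exact PySem.Int.band_nonneg_of_nonneg_left _ hm

theorem pv_shl_eq (a : Int) (n : Nat) : a <<< n = a * 2 ^ n := Int.shiftLeft_eq a n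

theorem pv_shl_nonneg {a : Int} (ha : 0 ≤ a) (n : Nat) : 0 ≤ a <<< n := by
  rw [pv_shl_eq]; positivity

theorem pv_zero_shl (n : Nat) : (0 : Int) <<< n = 0 := by
  rw [pv_shl_eq, zero_mul]

theorem pv_shl_shl (a : Int) (m n : Nat) : (a <<< m) <<< n = a <<< (m + n) := by
  simp [pv_shl_eq, pow_add, mul_assoc]

theorem pv_shl_natCast (m : Nat) (n : Nat) :
    ((m : Int) <<< n) = ((m <<< n : Nat) : Int) := by
  rw [pv_shl_eq, Nat.shiftLeft_eq]; push_cast; ring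

theorem pv_bor_shl {a b : Int} (ha : 0 ≤ a) (hb : 0 ≤ b) (n : Nat) :
    (PySem.Int.bor a b) <<< n = PySem.Int.bor (a <<< n) (b <<< n) := by
  rw [PySem.Int.bor_of_nonneg ha hb, pv_shl_natCast, Nat.shiftLeft_or_distrib,
    ← Int.toNat_of_nonneg ha, ← Int.toNat_of_nonneg hb,
    pv_shl_natCast, pv_shl_natCast, PySem.Int.bor_natCast, Int.toNat_natCast,
    Int.toNat_natCast]

theorem pv_zero_bor (a : Int) : PySem.Int.bor 0 a = a := by
  rw [PySem.Int.bor_comm, PySem.Int.bor_zero]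

theorem pv_bor_assoc {a b c : Int} (ha : 0 ≤ a) (hb : 0 ≤ b) (hc : 0 ≤ c) :
    PySem.Int.bor (PySem.Int.bor a b) c = PySem.Int.bor a (PySem.Int.bor b c) := by
  rw [PySem.Int.bor_of_nonneg ha hb, PySem.Int.bor_of_nonneg hb hc,
    PySem.Int.bor_of_nonneg (Int.natCast_nonneg _) hc,
    PySem.Int.bor_of_nonneg ha (Int.natCast_nonneg _),
    Int.toNat_natCast, Int.toNat_natCast, Nat.lor_assoc]

theorem pv_key {R X A : Int} (hr : 0 ≤ R) (hx : 0 ≤ X) (ha : 0 ≤ A) (s c : Nat) :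
    PySem.Int.bor (PySem.Int.bor R (X <<< c)) (A <<< (s + c)) =
      PySem.Int.bor R ((PySem.Int.bor (A <<< s) X) <<< c) := by
  rw [pv_bor_shl (pv_shl_nonneg ha s) hx, pv_shl_shl,
    pv_bor_assoc hr (pv_shl_nonneg hx c) (pv_shl_nonneg ha (s + c)),
    PySem.Int.bor_comm (X <<< c)]

theorem pv_pyGetD_cons_pos (i d : Int) (rest : List Int) (k : Int) (hk : 0 ≤ k) :
    PySem.List.pyGetD (i :: rest) (k + 1) d = PySem.List.pyGetD rest k d := by
  rw [← Int.toNat_of_nonneg hk,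
    show ((k.toNat : Int) + 1) = ((k.toNat + 1 : Nat) : Int) by push_cast; ring,
    PySem.List.pyGetD_natCast, PySem.List.pyGetD_natCast]
  simp [List.getD]

-- the Horner assembly --------------------------------------------------------

def pvAsm (size : Int) (l : List Int) : Int :=
  l.foldr (fun b r => PySem.Int.bor (r <<< size.toNat) b) 0

theorem pvAsm_eq_alt (data : List Int) (size total_size : Int) :
    concat_blocks_alt data size total_size = pvAsm size (pvBlocksB data size total_size) := by
  unfold concat_blocks_alt pvAsm
  rw [List.foldl_reverse]

theorem pvAsm_nonneg (size : Int) (l : List Int) (h : ∀ b ∈ l, 0 ≤ b) :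
    0 ≤ pvAsm size l := by
  induction l with
  | nil => simp [pvAsm]
  | cons b t ih =>
      exact pv_bor_nonneg
        (pv_shl_nonneg (ih (fun x hx => h x (List.mem_cons_of_mem _ hx))) _)
        (h b (List.mem_cons_self))

theorem pvBlocksB_nonneg (data : List Int) (size total_size : Int) :
    ∀ b ∈ pvBlocksB data size total_size, 0 ≤ b := by
  intro b hb
  unfold pvBlocksB at hb
  split at hb
  · split at hb
    · rcases List.mem_append.1 hb with h | h
      · rcases List.mem_map.1 h with ⟨x, _, rfl⟩
        exact pv_band_mask_nonneg _ _ (pv_mask_nonneg _)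
      · rcases List.mem_singleton.1 h with rfl
        exact pv_band_mask_nonneg _ _ (pv_mask_nonneg _)
    · rcases List.mem_map.1 hb with ⟨x, _, rfl⟩
      exact pv_band_mask_nonneg _ _ (pv_mask_nonneg _)
  · rcases List.mem_map.1 hb with ⟨x, _, rfl⟩
    exact pv_band_mask_nonneg _ _ (pv_mask_nonneg _)

-- structure of B's block list ------------------------------------------------

theorem pvBlocksB_nil (size ts : Int) : pvBlocksB [] size ts = [] := by
  unfold pvBlocksB
  split
  · rename_i hc
    have hk0 : 0 ≤ PySem.Int.floordiv ts size := by
      rw [pv_floordiv_eq _ _ (le_of_lt hc.1)]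
      exact Int.ediv_nonneg (le_of_lt hc.2.1) (le_of_lt hc.1)
    rw [if_neg (by simp only [List.length_nil, Nat.cast_zero]; omega),
      PySem.List.slice_to _ hk0]
    simp
  · simp

theorem pvBlocksB_break (i : Int) (rest : List Int) (size ts : Int)
    (h1 : 0 < ts) (h2 : ts < size) :
    pvBlocksB (i :: rest) size ts = [PySem.Int.band i ((1 <<< ts.toNat) - 1)] := by
  have hsz : 0 < size := lt_trans h1 h2
  have hmod : PySem.Int.mod ts size = ts := by
    rw [pv_mod_eq _ _ (le_of_lt hsz)]
    exact Int.emod_eq_of_lt (le_of_lt h1) h2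
  have hdiv : PySem.Int.floordiv ts size = 0 := by
    rw [pv_floordiv_eq _ _ (le_of_lt hsz)]
    exact Int.ediv_eq_zero_of_lt (le_of_lt h1) h2
  unfold pvBlocksB
  rw [if_pos ⟨hsz, h1, by rw [hmod]; exact ne_of_gt h1⟩, hdiv, hmod,
    if_pos (by simp only [List.length_cons]; push_cast; omega),
    PySem.List.slice_to _ (le_refl (0 : Int))]
  rw [show ((0 : Int) = ((0 : Nat) : Int)) from rfl, PySem.List.pyGetD_natCast]
  simp [List.getD]

theorem pvBlocksB_cons (i : Int) (rest : List Int) (size ts : Int)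
    (h : ¬(0 < ts ∧ ts < size)) :
    pvBlocksB (i :: rest) size ts =
      PySem.Int.band i ((1 <<< size.toNat) - 1) :: pvBlocksB rest size (ts - size) := by
  by_cases hc : 0 < size ∧ 0 < ts ∧ PySem.Int.mod ts size ≠ 0
  · -- truncation branch, with truncation index k = ts/size ≥ 1
    obtain ⟨hsz, hts, hmodne⟩ := hc
    have hbz : 0 ≤ size := le_of_lt hsz
    rw [pv_mod_eq _ _ hbz] at hmodne
    have hge : size ≤ ts := le_of_not_gt (fun hlt => h ⟨hts, hlt⟩)
    have hk1 : 1 ≤ ts / size := by rw [Int.le_ediv_iff_mul_le hsz]; omega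
    have hmod_sub : (ts - size) % size = ts % size := Int.sub_emod_right ts size
    have hdiv_sub : (ts - size) / size = ts / size - 1 := by
      rw [show ts - size = ts + (-1) * size by ring,
        Int.add_mul_ediv_right _ _ (ne_of_gt hsz)]
      ring
    have hts' : 0 < ts - size := by
      rcases lt_or_eq_of_le hge with h' | h'
      · omega
      · exact absurd (by rw [← h']; simp) hmodne
    have hc2 : 0 < size ∧ 0 < ts - size ∧ PySem.Int.mod (ts - size) size ≠ 0 := by
      refine ⟨hsz, hts', ?_⟩
      rw [pv_mod_eq _ _ hbz, hmod_sub]; exact hmodne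
    have hkI : PySem.Int.floordiv ts size = PySem.Int.floordiv (ts - size) size + 1 := by
      rw [pv_floordiv_eq _ _ hbz, pv_floordiv_eq _ _ hbz, hdiv_sub]; ring
    have hk0 : 0 ≤ PySem.Int.floordiv (ts - size) size := by
      rw [pv_floordiv_eq _ _ hbz, hdiv_sub]; omega
    have hmods : PySem.Int.mod (ts - size) size = PySem.Int.mod ts size := by
      rw [pv_mod_eq _ _ hbz, pv_mod_eq _ _ hbz, hmod_sub]
    have hto : (PySem.Int.floordiv ts size).toNat =
        (PySem.Int.floordiv (ts - size) size).toNat + 1 := by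
      rw [hkI]; omega
    unfold pvBlocksB
    rw [if_pos ⟨hsz, hts, by rw [pv_mod_eq _ _ hbz]; exact hmodne⟩, if_pos hc2]
    have hslice : (PySem.List.slice (i :: rest) none (some (PySem.Int.floordiv ts size)))
        = i :: PySem.List.slice rest none (some (PySem.Int.floordiv (ts - size) size)) := by
      rw [PySem.List.slice_to _ (by rw [hkI]; omega), PySem.List.slice_to _ hk0,
        hto, List.take_succ_cons]
    by_cases hlen : PySem.Int.floordiv ts size < ((i :: rest).length : Int)
    · rw [if_pos hlen,
        if_pos (by simp only [List.length_cons] at hlen; push_cast at hlen ⊢; omega),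
        hslice, hmods, hkI, pv_pyGetD_cons_pos _ _ _ _ hk0]
      simp
    · rw [if_neg hlen,
        if_neg (by simp only [List.length_cons] at hlen; push_cast at hlen ⊢; omega),
        hslice]
      simp
  · -- no truncation anywhere: both sides are plain maps
    have hc2 : ¬(0 < size ∧ 0 < ts - size ∧ PySem.Int.mod (ts - size) size ≠ 0) := by
      intro ⟨hsz, hts', hmodne⟩
      apply hc
      refine ⟨hsz, by omega, ?_⟩
      rw [pv_mod_eq _ _ (le_of_lt hsz)] at hmodne ⊢
      rwa [Int.sub_emod_right] at hmodne
    unfold pvBlocksB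
    rw [if_neg hc, if_neg hc2, List.map_cons]

-- A's loop computes result | (asm blocks) << (size*cnt) -----------------------

theorem pvLoopA_eq (size : Int) (hs : 0 ≤ size) (data : List Int) :
    ∀ (cnt result ts : Int), 0 ≤ cnt → 0 ≤ result →
    pvLoopA size ((1 <<< size.toNat) - 1) data cnt result ts =
      PySem.Int.bor result ((pvAsm size (pvBlocksB data size ts)) <<< (size * cnt).toNat) := by
  induction data with
  | nil =>
      intro cnt result ts _ _
      simp only [pvLoopA, pvBlocksB_nil, pvAsm, List.foldr_nil, pv_zero_shl,
        PySem.Int.bor_zero]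
  | cons i rest ih =>
      intro cnt result ts hc hr
      have hm : (0 : Int) ≤ (1 <<< size.toNat) - 1 := pv_mask_nonneg _
      by_cases hbr : 0 < ts ∧ ts < size
      · rw [pvBlocksB_break i rest size ts hbr.1 hbr.2]
        unfold pvLoopA pvAsm
        rw [if_pos hbr]
        simp only [List.foldr_cons, List.foldr_nil]
        rw [pv_zero_shl, pv_zero_bor]
      · unfold pvLoopA
        rw [if_neg hbr, pvBlocksB_cons i rest size ts hbr]
        have hb : 0 ≤ PySem.Int.band i ((1 <<< size.toNat) - 1) :=
          pv_band_mask_nonneg _ _ hm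
        have hA : 0 ≤ pvAsm size (pvBlocksB rest size (ts - size)) :=
          pvAsm_nonneg _ _ (pvBlocksB_nonneg rest size (ts - size))
        have hshift : (size * (cnt + 1)).toNat = size.toNat + (size * cnt).toNat := by
          have h1 : 0 ≤ size * cnt := mul_nonneg hs hc
          have h2 : size * (cnt + 1) = size + size * cnt := by ring
          omega
        rw [ih (cnt + 1) _ (ts - size) (by omega) (pv_bor_nonneg hr (pv_shl_nonneg hb _))]
        unfold pvAsm
        simp only [List.foldr_cons]
        rw [hshift]
        exact pv_key hr hb hA size.toNat (size * cnt).toNat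

-- ===== VERDICT (by name: the statement is the Claim_ definition above) =====
theorem concat_blocks_spec : Claim_equal_concat_blocks := by
  intro data size total_size _ hpre
  unfold Spec_concat_blocks concat_blocks
  rw [pvLoopA_eq size hpre data 0 0 total_size (le_refl 0) (le_refl 0), pvAsm_eq_alt,
    mul_zero, Int.toNat_zero, pv_shl_eq, pow_zero, mul_one, pv_zero_bor]
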